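-- pv_equiv track=rewrite | github.com/yharby/geoparquet-io | geoparquet_io/core/common.py | needs_httpfs
-- ===== SOURCE A (Python) =====
-- def needs_httpfs(path):
--     """
--     Check if path requires httpfs extension (S3, Azure, GCS).
--
--     HTTP/HTTPS work without httpfs, but cloud storage protocols need it.
--
--     Args:
--         path: File path or URL to check
--
--     Returns:
--         bool: True if httpfs extension is needed
--     """
--     httpfs_schemes = [
--         "s3://",
--         "s3a://",
--         "gs://",
--         "gcs://",
--         "az://",
--         "azure://",
--         "abfs://",
--         "abfss://",
--     ]
--     return any(path.startswith(scheme) for scheme in httpfs_schemes)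
-- ===== SOURCE B (Python) =====
-- _HTTPFS_SCHEMES = {"s3", "s3a", "gs", "gcs", "az", "azure", "abfs", "abfss"}
--
--
-- def needs_httpfs(path):
--     """
--     Check if path requires httpfs extension (S3, Azure, GCS).
--
--     HTTP/HTTPS work without httpfs, but cloud storage protocols need it.
--
--     Args:
--         path: File path or URL to check
--
--     Returns:
--         bool: True if httpfs extension is needed
--     """
--     scheme, sep, _ = path.partition("://")
--     return sep == "://" and scheme in _HTTPFS_SCHEMES
-- ===== Notes on version B (the rewrite author's own statement) =====
-- stated objective: idiomatic
-- what changed: Parses the scheme once with str.partition('://') and tests one set membership, instead of looping startswith over eight scheme-prefix strings.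
import Mathlib
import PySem

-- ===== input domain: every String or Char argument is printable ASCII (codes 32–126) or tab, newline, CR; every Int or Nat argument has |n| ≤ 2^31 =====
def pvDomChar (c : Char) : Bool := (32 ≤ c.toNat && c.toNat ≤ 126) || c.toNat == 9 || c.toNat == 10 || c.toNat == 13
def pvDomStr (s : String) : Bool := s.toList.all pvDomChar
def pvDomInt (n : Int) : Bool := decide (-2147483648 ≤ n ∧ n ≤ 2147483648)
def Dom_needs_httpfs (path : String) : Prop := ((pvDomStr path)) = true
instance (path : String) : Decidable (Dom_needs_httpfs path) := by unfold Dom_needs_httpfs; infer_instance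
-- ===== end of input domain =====

set_option maxRecDepth 4000


-- B replaces A's loop of eight startswith tests by one partition at '://' plus a set
-- membership test of the bare scheme (idiomatic; same cost).

-- ===== PORT A =====
def needs_httpfs (path : String) : Bool :=
  (["s3://", "s3a://", "gs://", "gcs://", "az://", "azure://", "abfs://", "abfss://"] : List String).any
    (fun scheme => PySem.Str.startswith path scheme)

-- ===== PORT B =====
-- Hand port of Python's str.partition("://") restricted to what B uses: it scans for the
-- FIRST occurrence of "://" and returns (part before it, part after it), or none when the
-- separator does not occur (Python then returns sep = "", so B returns false). Exact.
def pyPartitionSep3 : List Char → Option (List Char × List Char)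
  | [] => none
  | c :: cs =>
    if c = ':' ∧ cs.take 2 = ['/', '/'] then some ([], cs.drop 2)
    else (pyPartitionSep3 cs).map (fun pr => (c :: pr.1, pr.2))

-- the set {"s3","s3a","gs","gcs","az","azure","abfs","abfss"} of bare scheme names
def pvHttpfsSchemes : List (List Char) :=
  [['s','3'], ['s','3','a'], ['g','s'], ['g','c','s'],
   ['a','z'], ['a','z','u','r','e'], ['a','b','f','s'], ['a','b','f','s','s']]

def needs_httpfs_alt (path : String) : Bool :=
  match pyPartitionSep3 path.toList with
  | some (scheme, _) => pvHttpfsSchemes.contains scheme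
  | none => false

-- ===== PRECONDITION & SPEC =====
def Spec_needs_httpfs (path : String) (out : Bool) : Prop := out = needs_httpfs_alt path
instance (path : String) (out : Bool) : Decidable (Spec_needs_httpfs path out) := by unfold Spec_needs_httpfs; infer_instance

-- ===== CLAIM (what is proved, stated in full; the proofs are below) =====
def Claim_equal_needs_httpfs : Prop := ∀ (path : String), Dom_needs_httpfs path → Spec_needs_httpfs path (needs_httpfs path)

-- ===== LEMMAS AND PROOFS =====

lemma pyPartitionSep3_sound : ∀ (l p r : List Char),
    pyPartitionSep3 l = some (p, r) → l = p ++ ':' :: '/' :: '/' :: r := by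
  intro l
  induction l with
  | nil => intro p r h; simp [pyPartitionSep3] at h
  | cons c cs ih =>
    intro p r h
    rw [pyPartitionSep3] at h
    split_ifs at h with hc
    · rcases hc with ⟨hc1, hc2⟩
      rw [Option.some.injEq, Prod.mk.injEq] at h
      obtain ⟨h1, h2⟩ := h
      subst h1; subst h2; subst hc1
      conv_lhs => rw [show cs = cs.take 2 ++ cs.drop 2 from (List.take_append_drop 2 cs).symm]
      rw [hc2]; rfl
    · rcases Option.map_eq_some_iff.mp h with ⟨⟨p', r'⟩, hrec, heq⟩
      rw [Prod.mk.injEq] at heq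
      obtain ⟨h1, h2⟩ := heq
      subst h2
      rw [← h1, ih _ _ hrec]; rfl

lemma pyPartitionSep3_clean : ∀ (s r : List Char), (∀ c ∈ s, c ≠ ':') →
    pyPartitionSep3 (s ++ ':' :: '/' :: '/' :: r) = some (s, r) := by
  intro s
  induction s with
  | nil => intro r _; simp [pyPartitionSep3]
  | cons c cs ih =>
    intro r hs
    have hc : ¬ (c = ':' ∧ (cs ++ ':' :: '/' :: '/' :: r).take 2 = ['/', '/']) := by
      intro ⟨h1, _⟩; exact hs c (List.mem_cons_self) h1
    rw [List.cons_append, pyPartitionSep3, if_neg hc,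
        ih r (fun c hc => hs c (List.mem_cons_of_mem _ hc))]
    rfl

lemma startswith_iff_partition (l s : List Char) (hs : ∀ c ∈ s, c ≠ ':') :
    PySem.Chars.startswith l (s ++ [':', '/', '/']) = true ↔
      ∃ r, pyPartitionSep3 l = some (s, r) := by
  constructor
  · intro h
    rcases (PySem.Chars.startswith_iff _ _).mp h with ⟨t, ht⟩
    refine ⟨t, ?_⟩
    rw [← ht]
    have : s ++ [':', '/', '/'] ++ t = s ++ ':' :: '/' :: '/' :: t := by simp
    rw [this, pyPartitionSep3_clean s t hs]
  · intro ⟨r, hr⟩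
    have := pyPartitionSep3_sound l s r hr
    apply (PySem.Chars.startswith_iff _ _).mpr
    exact ⟨r, by simp [this]⟩

lemma startswith_eq_false_of_none (l s : List Char) (hs : ∀ c ∈ s, c ≠ ':')
    (h : pyPartitionSep3 l = none) :
    PySem.Chars.startswith l (s ++ [':', '/', '/']) = false := by
  by_contra hx
  rw [Bool.not_eq_false] at hx
  rcases (startswith_iff_partition l s hs).mp hx with ⟨r, hr⟩
  rw [h] at hr; simp at hr

lemma startswith_eq_beq_of_some (l s p r : List Char) (hs : ∀ c ∈ s, c ≠ ':')
    (h : pyPartitionSep3 l = some (p, r)) :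
    PySem.Chars.startswith l (s ++ [':', '/', '/']) = (p == s) := by
  by_cases hp : p = s
  · subst hp
    rw [(startswith_iff_partition l p hs).mpr ⟨r, h⟩, beq_self_eq_true]
  · rw [beq_eq_false_iff_ne.mpr hp]
    by_contra hx
    rw [Bool.not_eq_false] at hx
    rcases (startswith_iff_partition l s hs).mp hx with ⟨r', hr'⟩
    rw [h] at hr'
    simp only [Option.some.injEq, Prod.mk.injEq] at hr'
    exact hp hr'.1

-- ===== VERDICT (by name: the statement is the Claim_ definition above) =====
theorem needs_httpfs_spec : Claim_equal_needs_httpfs := by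
  intro path _
  unfold Spec_needs_httpfs needs_httpfs needs_httpfs_alt
  simp only [List.any_cons, List.any_nil, Bool.or_false, PySem.Str.startswith_eq]
  rw [show ("s3://".toList) = ['s','3'] ++ [':', '/', '/'] from rfl,
      show ("s3a://".toList) = ['s','3','a'] ++ [':', '/', '/'] from rfl,
      show ("gs://".toList) = ['g','s'] ++ [':', '/', '/'] from rfl,
      show ("gcs://".toList) = ['g','c','s'] ++ [':', '/', '/'] from rfl,
      show ("az://".toList) = ['a','z'] ++ [':', '/', '/'] from rfl,
      show ("azure://".toList) = ['a','z','u','r','e'] ++ [':', '/', '/'] from rfl,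
      show ("abfs://".toList) = ['a','b','f','s'] ++ [':', '/', '/'] from rfl,
      show ("abfss://".toList) = ['a','b','f','s','s'] ++ [':', '/', '/'] from rfl]
  cases h : pyPartitionSep3 path.toList with
  | none =>
    rw [startswith_eq_false_of_none _ ['s','3'] (by simp) h,
        startswith_eq_false_of_none _ ['s','3','a'] (by simp) h,
        startswith_eq_false_of_none _ ['g','s'] (by simp) h,
        startswith_eq_false_of_none _ ['g','c','s'] (by simp) h,
        startswith_eq_false_of_none _ ['a','z'] (by simp) h,
        startswith_eq_false_of_none _ ['a','z','u','r','e'] (by simp) h,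
        startswith_eq_false_of_none _ ['a','b','f','s'] (by simp) h,
        startswith_eq_false_of_none _ ['a','b','f','s','s'] (by simp) h]
    rfl
  | some pr =>
    obtain ⟨p, r⟩ := pr
    rw [startswith_eq_beq_of_some _ ['s','3'] p r (by simp) h,
        startswith_eq_beq_of_some _ ['s','3','a'] p r (by simp) h,
        startswith_eq_beq_of_some _ ['g','s'] p r (by simp) h,
        startswith_eq_beq_of_some _ ['g','c','s'] p r (by simp) h,
        startswith_eq_beq_of_some _ ['a','z'] p r (by simp) h,
        startswith_eq_beq_of_some _ ['a','z','u','r','e'] p r (by simp) h,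
        startswith_eq_beq_of_some _ ['a','b','f','s'] p r (by simp) h,
        startswith_eq_beq_of_some _ ['a','b','f','s','s'] p r (by simp) h]
    simp only [pvHttpfsSchemes, List.contains_cons, List.contains_nil, Bool.or_false]
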